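-- pv_equiv track=rewrite | github.com/DanielGuz13/reto-Semana-01- | main.py | limpiar_valor
-- ===== SOURCE A (Python) =====
-- def limpiar_valor(valor):
--     """
--     Limpia un valor individual:
--     - Quita espacios
--     - Elimina caracteres no validos
--     - Retorna el numero limpio como string
--     """
--     #Este es para los espacios
--     valores_limpios = valor.strip()
--
--     #Solo dara los valores validos y luego reotrna en string
--     caracteres_validos = '0123456789.-'
--     resultado = ''
--     for char in valores_limpios:
--         if char in caracteres_validos:
--             resultado += char
--     return resultado
-- ===== SOURCE B (Python) =====
-- def limpiar_valor(valor):
--     # Staged deletion: instead of scanning char-by-char and accumulating the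
--     # valid ones, compute the distinct characters present and delete every
--     # invalid one from the whole string with str.replace (one C-level pass per
--     # distinct invalid character). Deletions of distinct characters commute and
--     # preserve the relative order of the survivors, so the result is the same.
--     s = valor.strip()
--     for ch in set(s):
--         if ch not in '0123456789.-':
--             s = s.replace(ch, '')
--     return s
-- ===== Notes on version B (the rewrite author's own statement) =====
-- stated objective: alternative
-- what changed: Instead of A's single char-by-char scan accumulating valid characters, B computes the set of distinct characters of the stripped string and deletes each invalid one from the whole string with a str.replace pass; distinct-character deletions commute and preserve the survivors' order, so the result is identical.
import Mathlib
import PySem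

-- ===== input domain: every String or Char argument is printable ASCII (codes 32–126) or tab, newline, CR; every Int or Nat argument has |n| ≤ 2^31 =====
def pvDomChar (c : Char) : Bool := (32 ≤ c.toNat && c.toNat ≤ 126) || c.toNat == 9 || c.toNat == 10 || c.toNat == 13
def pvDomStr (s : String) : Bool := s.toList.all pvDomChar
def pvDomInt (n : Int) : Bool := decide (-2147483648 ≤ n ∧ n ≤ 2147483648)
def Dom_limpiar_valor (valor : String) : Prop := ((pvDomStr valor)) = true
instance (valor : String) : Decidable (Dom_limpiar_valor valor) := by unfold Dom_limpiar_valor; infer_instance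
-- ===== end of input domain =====

-- B replaces A's per-character accumulation loop by staged whole-string deletions:
-- one str.replace pass per distinct invalid character present (alternative decomposition).

-- ===== PORT A =====
-- A: strip, then loop over the characters appending each one that is in '0123456789.-'.
def limpiar_valor (valor : String) : String :=
  let valores_limpios := (PySem.Str.strip valor).toList
  let caracteres_validos := "0123456789.-".toList
  let resultado := valores_limpios.foldl
    (fun acc c => if PySem.Chars.isIn [c] caracteres_validos then acc ++ [c] else acc) []
  String.ofList resultado

-- ===== PORT B =====
-- B: s = valor.strip(); for ch in set(s): if ch not in '0123456789.-': s = s.replace(ch, '').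
-- (set iteration order in CPython is unspecified; distinct-character deletions commute, so the
--  result is order-independent — the port iterates in PySem.Set.ofList order, first occurrences.)
def limpiar_valor_alt (valor : String) : String :=
  let s := PySem.Str.strip valor
  (PySem.Set.ofList s.toList).foldl
    (fun s ch =>
      if !(PySem.Str.isIn (String.ofList [ch]) "0123456789.-") then
        PySem.Str.replace s (String.ofList [ch]) ""
      else s) s

-- ===== PRECONDITION & SPEC =====
def Spec_limpiar_valor (valor : String) (out : String) : Prop := out = limpiar_valor_alt valor
instance (valor : String) (out : String) : Decidable (Spec_limpiar_valor valor out) := by unfold Spec_limpiar_valor; infer_instance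

-- ===== CLAIM (what is proved, stated in full; the proofs are below) =====
def Claim_equal_limpiar_valor : Prop := ∀ (valor : String), Dom_limpiar_valor valor → Spec_limpiar_valor valor (limpiar_valor valor)

-- ===== LEMMAS AND PROOFS =====

-- replacing a single character by the empty string is filtering it out (fuel-indexed loop)
lemma replace_go_filter (c : Char) :
    ∀ (fuel : Nat) (l acc : List Char), l.length ≤ fuel →
      PySem.Chars.replace.go [c] [] fuel l acc = acc.reverse ++ l.filter (fun x => x != c) := by
  intro fuel
  induction fuel with
  | zero =>
    intro l acc h
    have : l = [] := List.eq_nil_of_length_eq_zero (Nat.le_zero.mp h)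
    subst this
    simp [PySem.Chars.replace.go]
  | succ n ih =>
    intro l acc h
    cases l with
    | nil => simp [PySem.Chars.replace.go]
    | cons x t =>
      by_cases hx : x = c
      · subst hx
        have hp : ([x].isPrefixOf (x :: t)) = true := by simp [List.isPrefixOf]
        rw [PySem.Chars.replace.go]
        rw [if_pos hp]
        simp only [List.length_cons, List.length_nil, List.drop_succ_cons, List.drop_zero,
          List.reverse_nil, List.nil_append]
        rw [ih t acc (Nat.le_of_succ_le_succ h)]
        simp
      · have hp : ([c].isPrefixOf (x :: t)) = false := by
          simp [List.isPrefixOf]; exact fun hh => absurd hh.symm hx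
        rw [PySem.Chars.replace.go]
        rw [if_neg (by simp [hp])]
        rw [ih t (x :: acc) (Nat.le_of_succ_le_succ h)]
        simp [hx]

lemma replace_single_filter (l : List Char) (c : Char) :
    PySem.Chars.replace l [c] [] = l.filter (fun x => x != c) := by
  unfold PySem.Chars.replace
  rw [if_neg (by simp)]
  exact replace_go_filter c l.length l [] le_rfl

-- folding single-character deletions over cs filters out the characters of cs failing p
lemma foldl_delete_filter (p : Char → Bool) :
    ∀ (cs l : List Char),
      cs.foldl (fun s c => if !(p c) then PySem.Chars.replace s [c] [] else s) l
        = l.filter (fun x => !(cs.contains x && !(p x))) := by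
  intro cs
  induction cs with
  | nil => intro l; simp
  | cons c cs ih =>
    intro l
    simp only [List.foldl_cons]
    by_cases hc : p c
    · rw [if_neg (by simp [hc]), ih]
      apply List.filter_congr
      intro x _
      by_cases hxc : x = c
      · subst hxc; simp [hc]
      · simp [hxc]
    · rw [if_pos (by simp [hc]), ih, replace_single_filter, List.filter_filter]
      apply List.filter_congr
      intro x _
      by_cases hxc : x = c
      · subst hxc; simp [hc]
      · simp [hxc]

-- the String-level fold of B computes, on toList, the List-level fold
lemma toList_foldl_replace (p : Char → Bool) :
    ∀ (cs : List Char) (s : String),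
      (cs.foldl (fun s ch => if !(p ch) then PySem.Str.replace s (String.ofList [ch]) "" else s) s).toList
        = cs.foldl (fun l ch => if !(p ch) then PySem.Chars.replace l [ch] [] else l) s.toList := by
  intro cs
  induction cs with
  | nil => intro s; simp
  | cons c cs ih =>
    intro s
    simp only [List.foldl_cons]
    rw [ih]
    by_cases hc : p c
    · simp [hc]
    · simp only [hc, Bool.not_false, if_pos]
      congr 1
      simpa using PySem.Str.toList_replace s (String.ofList [c]) ""

-- ===== VERDICT (by name: the statement is the Claim_ definition above) =====
theorem limpiar_valor_spec : Claim_equal_limpiar_valor := by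
  intro valor _
  unfold Spec_limpiar_valor limpiar_valor limpiar_valor_alt
  simp only [PySem.List.foldl_append_if_eq_filter]
  apply String.ext
  rw [toList_foldl_replace (fun ch => PySem.Str.isIn (String.ofList [ch]) "0123456789.-"),
    foldl_delete_filter (fun ch => PySem.Str.isIn (String.ofList [ch]) "0123456789.-")]
  simp only [String.toList_ofList, List.nil_append]
  apply List.filter_congr
  intro x hx
  have hmem : List.contains (PySem.Set.ofList (PySem.Str.strip valor).toList) x = true := by
    simp only [List.contains_eq_mem, decide_eq_true_eq]
    exact (PySem.Set.mem_ofList _ x).mpr hx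
  rw [hmem]
  simp [PySem.Str.isIn_eq]
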